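-- pv_equiv track=rewrite | github.com/zkkython/sglang-jax-gpu | python/sgl_jax/tools/trace_diff.py | group_by_content_hash
-- ===== SOURCE A (Python) =====
-- from typing import Dict, List, Optional, Set, Tuple
--
-- def group_by_content_hash(traces: List[Dict]) -> Dict[str, List[Dict]]:
--     groups = {}
--     for trace in traces:
--         content_hash = trace.get("content_hash")
--         if content_hash:
--             if content_hash not in groups:
--                 groups[content_hash] = []
--             groups[content_hash].append(trace)
--     return groups
-- ===== SOURCE B (Python) =====
-- def group_by_content_hash(traces):
--     # two-phase: ordered dedup of truthy hashes, then one filter pass per key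
--     keys = list(dict.fromkeys(h for t in traces if (h := t.get("content_hash"))))
--     return {h: [t for t in traces if t.get("content_hash") == h] for h in keys}
-- ===== Notes on version B (the rewrite author's own statement) =====
-- stated objective: alternative
-- what changed: Replaced the single incremental dict-append pass by a two-phase grouping: first collect the ordered deduplicated list of truthy content hashes, then build each group with a per-key filter comprehension over the traces.
import Mathlib
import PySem

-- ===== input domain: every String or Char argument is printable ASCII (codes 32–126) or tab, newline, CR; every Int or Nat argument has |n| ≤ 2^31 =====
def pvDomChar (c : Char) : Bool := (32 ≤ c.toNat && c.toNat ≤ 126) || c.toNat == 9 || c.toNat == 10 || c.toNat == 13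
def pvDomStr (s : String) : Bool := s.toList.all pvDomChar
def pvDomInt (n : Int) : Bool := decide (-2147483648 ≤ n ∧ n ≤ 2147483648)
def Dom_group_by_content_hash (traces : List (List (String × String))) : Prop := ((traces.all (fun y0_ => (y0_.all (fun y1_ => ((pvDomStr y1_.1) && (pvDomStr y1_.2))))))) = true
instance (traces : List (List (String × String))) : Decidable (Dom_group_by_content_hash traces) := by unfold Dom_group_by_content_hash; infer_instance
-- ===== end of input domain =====

-- ===== PORT A =====
-- B groups by collecting the ordered deduplicated truthy hashes, then filtering traces per key (alternative decomposition).
-- shared tiny helper: trace.get("content_hash") (first-match association-list lookup, like Python dict.get)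
def pvHashOf (t : List (String × String)) : Option String :=
  (PySem.Dict.mk t).get? "content_hash"

def pvStepA (g : PySem.Dict String (List (List (String × String)))) (t : List (String × String)) :
    PySem.Dict String (List (List (String × String))) :=
  match pvHashOf t with
  | none => g
  | some h =>
      if h = "" then g
      else (if g.contains h then g else g.insert h []).modify h [] (fun l => l ++ [t])

def group_by_content_hash (traces : List (List (String × String))) : List (String × List (List (String × String))) :=
  (traces.foldl pvStepA PySem.Dict.empty).items

-- ===== PORT B =====
-- the walrus-filtered generator: yields the hash of t when it is truthy (present and nonempty)
def pvKeyOf (t : List (String × String)) : Option String :=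
  match pvHashOf t with
  | none => none
  | some h => if h = "" then none else some h

def group_by_content_hash_alt (traces : List (List (String × String))) : List (String × List (List (String × String))) :=
  let keys := PySem.List.dedup (traces.filterMap pvKeyOf)
  keys.map (fun h => (h, traces.filter (fun t => pvHashOf t == some h)))

-- ===== PRECONDITION & SPEC =====
def Spec_group_by_content_hash (traces : List (List (String × String))) (out : List (String × List (List (String × String)))) : Prop := out = group_by_content_hash_alt traces
instance (traces : List (List (String × String))) (out : List (String × List (List (String × String)))) : Decidable (Spec_group_by_content_hash traces out) := by unfold Spec_group_by_content_hash; infer_instance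

-- ===== CLAIM (what is proved, stated in full; the proofs are below) =====
def Claim_equal_group_by_content_hash : Prop := ∀ (traces : List (List (String × String))), Dom_group_by_content_hash traces → Spec_group_by_content_hash traces (group_by_content_hash traces)

-- ===== LEMMAS AND PROOFS =====
lemma pvKeyOf_mem_ne_empty {h : String} {l : List (List (String × String))}
    (hm : h ∈ l.filterMap pvKeyOf) : h ≠ "" := by
  obtain ⟨t, -, ht⟩ := List.mem_filterMap.mp hm
  unfold pvKeyOf at ht
  cases hh : pvHashOf t with
  | none => simp [hh] at ht
  | some h' => rw [hh] at ht; by_cases he : h' = "" <;> simp [he] at ht; exact ht ▸ he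

lemma pvKeyOf_eq_some_iff {t : List (String × String)} {h : String} (hne : h ≠ "") :
    pvKeyOf t = some h ↔ pvHashOf t = some h := by
  unfold pvKeyOf
  cases hh : pvHashOf t with
  | none => simp
  | some h' =>
    by_cases he : h' = ""
    · simp [he]
      exact hne
    · simp [he]

lemma pvMain (l : List (List (String × String))) :
    (l.foldl pvStepA PySem.Dict.empty).items =
      (PySem.List.dedup (l.filterMap pvKeyOf)).map
        (fun h => (h, l.filter (fun t => pvHashOf t == some h))) := by
  induction l using List.reverseRecOn with
  | nil => rfl
  | append_singleton l t ih =>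
    have hkeys : (l.foldl pvStepA PySem.Dict.empty).keys = PySem.List.dedup (l.filterMap pvKeyOf) := by
      show (l.foldl pvStepA PySem.Dict.empty).items.map (·.1) = _
      rw [ih, List.map_map]; simp [Function.comp_def]
    have hnodup : (l.foldl pvStepA PySem.Dict.empty).keys.Nodup := by
      rw [hkeys]; exact PySem.Set.nodup_ofList _
    rw [List.foldl_append, List.foldl_cons, List.foldl_nil, List.filterMap_append]
    set g := l.foldl pvStepA PySem.Dict.empty with hg
    cases hh : pvHashOf t with
    | none =>
      have hk : pvKeyOf t = none := by unfold pvKeyOf; rw [hh]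
      have hstep : pvStepA g t = g := by simp [pvStepA, hh]
      have hft : List.filterMap pvKeyOf [t] = [] := by simp [hk]
      rw [hstep, hft, List.append_nil, ih]
      apply List.map_congr_left
      intro h hm
      have : ¬ (pvHashOf t == some h) := by simp [hh]
      simp [List.filter_append, this]
    | some h0 =>
      by_cases he : h0 = ""
      · have hk : pvKeyOf t = none := by unfold pvKeyOf; rw [hh]; simp [he]
        have hstep : pvStepA g t = g := by simp [pvStepA, hh, he]
        have hft : List.filterMap pvKeyOf [t] = [] := by simp [hk]
        rw [hstep, hft, List.append_nil, ih]
        apply List.map_congr_left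
        intro h hm
        have hne : h ≠ "" := pvKeyOf_mem_ne_empty (by simpa using (PySem.Set.mem_ofList _ _).mp hm)
        have : ¬ (pvHashOf t == some h) := by simp [hh, he]; exact fun e => hne e
        simp [List.filter_append, this]
      · have hk : pvKeyOf t = some h0 := by unfold pvKeyOf; rw [hh]; simp [he]
        have hstep : pvStepA g t =
            (if g.contains h0 then g else g.insert h0 []).modify h0 [] (fun l => l ++ [t]) := by
          simp [pvStepA, hh, he]
        have hft : List.filterMap pvKeyOf [t] = [h0] := by simp [hk]
        rw [hstep, hft]
        have hded : PySem.List.dedup (l.filterMap pvKeyOf ++ [h0]) =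
            if h0 ∈ l.filterMap pvKeyOf then PySem.List.dedup (l.filterMap pvKeyOf)
            else PySem.List.dedup (l.filterMap pvKeyOf) ++ [h0] := by
          show PySem.Set.ofList _ = _
          rw [PySem.Set.ofList_append_singleton, PySem.Set.add]
          rw [PySem.Set.contains_eq_decide]
          by_cases hm : h0 ∈ l.filterMap pvKeyOf <;>
            simp [PySem.List.dedup, (PySem.Set.mem_ofList _ _), hm]
        by_cases hm : h0 ∈ l.filterMap pvKeyOf
        · -- existing key: modify appends
          have hcont : g.contains h0 = true := by
            rw [PySem.Dict.contains_eq_decide_mem_keys, hkeys]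
            simp [PySem.List.dedup, PySem.Set.mem_ofList, hm]
          rw [if_pos hcont, PySem.Dict.modify]
          have hmem_items : (h0, l.filter (fun t => pvHashOf t == some h0)) ∈ g.items := by
            rw [ih]
            exact List.mem_map.mpr ⟨h0, by simpa [PySem.List.dedup] using (PySem.Set.mem_ofList _ _).mpr hm, rfl⟩
          have hgetD : g.getD h0 [] = l.filter (fun t => pvHashOf t == some h0) :=
            PySem.Dict.getD_of_mem_items g hmem_items hnodup []
          show (g.insert h0 _).items = _
          rw [PySem.Dict.items_insert_of_contains g _ hcont, hgetD, ih, List.map_map, hded, if_pos hm]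
          apply List.map_congr_left
          intro h hmem
          have hinl : h ∈ l.filterMap pvKeyOf := by
            simpa [PySem.List.dedup] using (PySem.Set.mem_ofList _ _).mp hmem
          by_cases hh0 : h = h0
          · subst hh0; simp [List.filter_append, hh]
          · have : ¬ (pvHashOf t == some h) := by simp [hh]; exact fun e => hh0 e.symm
            simp [List.filter_append, this, hh0]
        · -- fresh key
          have hcont : g.contains h0 = false := by
            rw [PySem.Dict.contains_eq_decide_mem_keys, hkeys]
            simp [PySem.List.dedup, PySem.Set.mem_ofList, hm]
          rw [if_neg (by simp [hcont]), PySem.Dict.modify]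
          rw [PySem.Dict.insert_insert_self, PySem.Dict.getD_insert_self]
          rw [PySem.Dict.items_insert_of_not_contains g _ hcont, ih, hded, if_neg hm]
          rw [List.map_append]
          congr 1
          · apply List.map_congr_left
            intro h hmem
            have hinl : h ∈ l.filterMap pvKeyOf := by
              simpa [PySem.List.dedup] using (PySem.Set.mem_ofList _ _).mp hmem
            have hh0 : h ≠ h0 := fun e => hm (e ▸ hinl)
            have : ¬ (pvHashOf t == some h) := by simp [hh]; exact fun e => hh0 e.symm
            simp [List.filter_append, this]
          · have hfl : l.filter (fun t => pvHashOf t == some h0) = [] := by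
              rw [List.filter_eq_nil_iff]
              intro t' ht'
              simp only [beq_iff_eq]
              intro e
              exact hm (List.mem_filterMap.mpr ⟨t', ht', (pvKeyOf_eq_some_iff he).mpr e⟩)
            simp [List.filter_append, hfl, hh]

-- ===== VERDICT (by name: the statement is the Claim_ definition above) =====
theorem group_by_content_hash_spec : Claim_equal_group_by_content_hash := by
  intro traces _
  unfold Spec_group_by_content_hash group_by_content_hash group_by_content_hash_alt
  exact pvMain traces
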